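-- pv_equiv track=rewrite | github.com/lukovnikov/parseq | parseq/scripts_insert/overnight_treeinsert_new.py | make_numbered_tokens
-- ===== SOURCE A (Python) =====
-- from typing import Dict, List, Union, Iterable, Tuple
--
-- def make_numbered_tokens(x:List[str]):
--     counts = {}
--     y = []
--     for xe in x:
--         if xe not in counts:
--             counts[xe] = 0
--         counts[xe] += 1
--         y.append(f"{xe}::{counts[xe]}")
--     return y
-- ===== SOURCE B (Python) =====
-- from typing import List
--
-- def make_numbered_tokens(x: List[str]):
--     return [f"{xe}::{x[:i+1].count(xe)}" for i, xe in enumerate(x)]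
-- ===== Notes on version B (the rewrite author's own statement) =====
-- stated objective: simpler
-- what changed: Replaces the incremental counts-dict pass with a one-line enumerate comprehension that recomputes each token's occurrence number by counting it in the prefix x[:i+1].
import Mathlib
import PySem

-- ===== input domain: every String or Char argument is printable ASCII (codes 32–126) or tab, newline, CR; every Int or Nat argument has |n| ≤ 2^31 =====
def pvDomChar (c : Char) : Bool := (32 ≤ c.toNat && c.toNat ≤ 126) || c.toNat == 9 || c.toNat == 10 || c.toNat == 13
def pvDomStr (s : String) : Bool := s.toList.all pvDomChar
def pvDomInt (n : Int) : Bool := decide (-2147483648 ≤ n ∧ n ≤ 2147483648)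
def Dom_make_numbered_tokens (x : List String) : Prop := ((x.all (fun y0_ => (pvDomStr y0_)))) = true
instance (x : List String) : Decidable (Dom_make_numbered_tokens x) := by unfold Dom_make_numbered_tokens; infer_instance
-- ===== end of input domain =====

-- B replaces A's incremental counts-dict pass by an enumerate comprehension that recounts each token in the prefix x[:i+1] (simpler, not faster).


-- ===== PORT A =====
def make_numbered_tokens (x : List String) : List String :=
  (x.foldl (fun (s : PySem.Dict String Int × List String) xe =>
      let counts := if s.1.contains xe = false then s.1.insert xe 0 else s.1
      let counts := counts.insert xe (counts.getD xe 0 + 1)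
      (counts, s.2 ++ [xe ++ "::" ++ PySem.Int.toStr (counts.getD xe 0)]))
    (PySem.Dict.empty, [])).2

-- ===== PORT B =====
def make_numbered_tokens_alt (x : List String) : List String :=
  (PySem.List.enumerate x).map (fun p =>
    p.2 ++ "::" ++ PySem.Int.toStr ((PySem.List.count (PySem.List.slice x none (some (p.1 + 1))) p.2 : Int)))

-- ===== PRECONDITION & SPEC =====
def Spec_make_numbered_tokens (x : List String) (out : List String) : Prop := out = make_numbered_tokens_alt x
instance (x : List String) (out : List String) : Decidable (Spec_make_numbered_tokens x out) := by unfold Spec_make_numbered_tokens; infer_instance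

-- ===== CLAIM (what is proved, stated in full; the proofs are below) =====
def Claim_equal_make_numbered_tokens : Prop := ∀ (x : List String), Dom_make_numbered_tokens x → Spec_make_numbered_tokens x (make_numbered_tokens x)

-- ===== LEMMAS AND PROOFS =====

-- canonical structural form: tokens of l numbered continuing after prefix `pre`
def pvGo (pre l : List String) : List String :=
  match l with
  | [] => []
  | xe :: rest =>
      (xe ++ "::" ++ PySem.Int.toStr ((pre ++ [xe]).count xe : Int)) :: pvGo (pre ++ [xe]) rest

-- A-side: the fold from any dict agreeing with `pre`'s counts produces pvGo pre l
lemma a_loop (l : List String) : ∀ (pre y : List String) (d : PySem.Dict String Int),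
    (∀ v, d.getD v 0 = (pre.count v : Int)) →
    (l.foldl (fun (s : PySem.Dict String Int × List String) xe =>
        let counts := if s.1.contains xe = false then s.1.insert xe 0 else s.1
        let counts := counts.insert xe (counts.getD xe 0 + 1)
        (counts, s.2 ++ [xe ++ "::" ++ PySem.Int.toStr (counts.getD xe 0)]))
      (d, y)).2 = y ++ pvGo pre l := by
  induction l with
  | nil => intro pre y d _; simp [pvGo]
  | cons xe rest ih =>
    intro pre y d hd
    have hc0 : (if d.contains xe = false then d.insert xe 0 else d).getD xe 0
        = (pre.count xe : Int) := by
      by_cases h : d.contains xe = false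
      · have := hd xe
        rw [PySem.Dict.getD_of_not_contains (h := h)] at this
        simp only [h, if_true, PySem.Dict.getD_insert_self]
        omega
      · simp [h, hd]
    simp only [List.foldl_cons]
    rw [ih (pre ++ [xe]) _ _ ?_]
    · simp only [pvGo]
      have : ((pre ++ [xe]).count xe : Int) = pre.count xe + 1 := by
        simp [List.count_append]
      rw [this]; simp [PySem.Dict.getD_insert_self, hc0, List.append_assoc]
    · intro v
      by_cases hv : v = xe
      · subst hv
        simp [PySem.Dict.getD_insert_self, hc0, List.count_append]
      · rw [PySem.Dict.getD_insert]
        have : (if d.contains xe = false then d.insert xe 0 else d).getD v 0 = d.getD v 0 := by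
          by_cases h : d.contains xe = false
          · simp [h, PySem.Dict.getD_insert, hv]
          · simp [h]
        rw [if_neg hv, this, hd]
        have hne : ¬ xe = v := fun h => hv h.symm
        simp [List.count_append, hne]

-- B-side: the enumerate/map form, started at offset pre.length over the full list pre ++ l, is pvGo pre l
lemma b_loop (l : List String) : ∀ (pre : List String),
    (PySem.List.enumerate l (pre.length : Int)).map (fun p =>
        p.2 ++ "::" ++ PySem.Int.toStr ((PySem.List.count (PySem.List.slice (pre ++ l) none (some (p.1 + 1))) p.2 : Int)))
      = pvGo pre l := by
  induction l with
  | nil => intro pre; simp [PySem.List.enumerate_nil, pvGo]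
  | cons xe rest ih =>
    intro pre
    rw [PySem.List.enumerate_cons]
    simp only [List.map_cons, pvGo]
    congr 1
    · have hcast : ((pre.length : Int) + 1) = ((pre.length + 1 : Nat) : Int) := by push_cast; ring
      rw [hcast, PySem.List.slice_to_natCast]
      have htake : (pre ++ xe :: rest).take (pre.length + 1) = pre ++ [xe] := by
        rw [show pre.length + 1 = pre.length + 1 from rfl]
        rw [List.take_append]
        simp
      rw [htake, PySem.List.count_eq]
    · have hlen : ((pre.length : Int) + 1) = (((pre ++ [xe]).length : Nat) : Int) := by
        push_cast [List.length_append, List.length_singleton]; omega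
      rw [hlen]
      have := ih (pre ++ [xe])
      simpa [List.append_assoc] using this

-- ===== VERDICT (by name: the statement is the Claim_ definition above) =====
theorem make_numbered_tokens_spec : Claim_equal_make_numbered_tokens := by
  intro x _
  unfold Spec_make_numbered_tokens make_numbered_tokens make_numbered_tokens_alt
  rw [a_loop x [] [] PySem.Dict.empty (by simp [PySem.Dict.getD_empty])]
  have := b_loop x []
  simpa using this.symm
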